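-- pv_equiv track=rewrite | github.com/Maneesh-Relanto/MD-Files-Connector | md_connector.py | _first_paragraph_after_heading
-- ===== SOURCE A (Python) =====
-- def _looks_like_text(stripped: str) -> bool:
--     """Return True for plain-text lines that could begin a description."""
--     return (
--         bool(stripped)
--         and len(stripped) < 80
--         and not stripped.startswith("-")
--         and not stripped.startswith("*")
--     )
--
-- def _first_paragraph_after_heading(lines: list[str]) -> list[str]:
--     """Return the first paragraph of text that appears after a heading line."""
--     past_heading = False
--     para: list[str] = []
--     for line in lines:
--         if line.startswith("#"):
--             past_heading = True
--             if para:
--                 break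
--             continue
--         if not past_heading:
--             if _looks_like_text(line):
--                 past_heading = True
--             continue
--         if line:
--             para.append(line)
--         elif para:
--             break
--     return para
-- ===== SOURCE B (Python) =====
-- def _looks_like_text(stripped: str) -> bool:
--     return (
--         bool(stripped)
--         and len(stripped) < 80
--         and not stripped.startswith("-")
--         and not stripped.startswith("*")
--     )
--
-- def _first_paragraph_after_heading(lines: list[str]) -> list[str]:
--     # Phase 1: find the trigger line (a heading or the first text-looking line);
--     # collection begins just after it.
--     start = None
--     for i, line in enumerate(lines):
--         if line.startswith("#") or _looks_like_text(line):
--             start = i + 1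
--             break
--     if start is None:
--         return []
--     # Phase 2: collect the first paragraph, skipping further headings/blanks
--     # while the paragraph is empty, stopping at the first once it is non-empty.
--     para = []
--     for line in lines[start:]:
--         if line.startswith("#") or not line:
--             if para:
--                 break
--             continue
--         para.append(line)
--     return para
-- ===== Notes on version B (the rewrite author's own statement) =====
-- stated objective: simpler
-- what changed: Replaced the single stateful loop with a past_heading flag by two phases: one scan that locates the trigger line (heading or first text-looking line) and a second scan from just after it that collects the paragraph, so the flag and the _looks_like_text check disappear from the collection loop.
import Mathlib
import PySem

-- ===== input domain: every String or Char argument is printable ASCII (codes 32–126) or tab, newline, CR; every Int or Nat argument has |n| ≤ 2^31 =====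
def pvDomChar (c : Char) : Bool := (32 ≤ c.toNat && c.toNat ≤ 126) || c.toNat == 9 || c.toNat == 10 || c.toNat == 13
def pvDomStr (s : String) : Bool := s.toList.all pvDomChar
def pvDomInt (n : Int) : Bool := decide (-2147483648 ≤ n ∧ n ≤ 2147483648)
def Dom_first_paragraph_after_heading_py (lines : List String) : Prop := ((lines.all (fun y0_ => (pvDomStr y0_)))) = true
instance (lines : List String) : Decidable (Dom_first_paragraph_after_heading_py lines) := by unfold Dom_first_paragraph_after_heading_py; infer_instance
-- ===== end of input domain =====

-- B: same return value, two-phase decomposition (find the trigger line, then collect) — simpler collection loop.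
-- ===== PORT A =====
-- port of _looks_like_text (shared helper of both versions)
def looksLikeText (s : String) : Bool :=
  (s != "") && (PySem.Str.len s < 80) && !(PySem.Str.startswith s "-") && !(PySem.Str.startswith s "*")

-- the for-loop of A, state (past_heading, para); `break` returns para
def fpahLoopA (past : Bool) (para : List String) : List String → List String
  | [] => para
  | line :: rest =>
    if PySem.Str.startswith line "#" then
      if para ≠ [] then para else fpahLoopA true para rest
    else if !past then
      if looksLikeText line then fpahLoopA true para rest else fpahLoopA false para rest
    else if line ≠ "" then fpahLoopA past (para ++ [line]) rest
    else if para ≠ [] then para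
    else fpahLoopA past para rest

def first_paragraph_after_heading_py (lines : List String) : List String :=
  fpahLoopA false [] lines

-- ===== PORT B =====
-- phase 1 of B: find the trigger line; returns the lines after it (none = no trigger)
def fpahStart : List String → Option (List String)
  | [] => none
  | line :: rest =>
    if PySem.Str.startswith line "#" || looksLikeText line then some rest else fpahStart rest

-- phase 2 of B: collect the paragraph
def fpahCollect (para : List String) : List String → List String
  | [] => para
  | line :: rest =>
    if PySem.Str.startswith line "#" || line == "" then
      if para ≠ [] then para else fpahCollect para rest
    else fpahCollect (para ++ [line]) rest

def first_paragraph_after_heading_py_alt (lines : List String) : List String :=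
  match fpahStart lines with
  | none => []
  | some rest => fpahCollect [] rest

-- ===== PRECONDITION & SPEC =====
def Spec_first_paragraph_after_heading_py (lines : List String) (out : List String) : Prop := out = first_paragraph_after_heading_py_alt lines
instance (lines : List String) (out : List String) : Decidable (Spec_first_paragraph_after_heading_py lines out) := by unfold Spec_first_paragraph_after_heading_py; infer_instance

-- ===== CLAIM (what is proved, stated in full; the proofs are below) =====
def Claim_equal_first_paragraph_after_heading_py : Prop := ∀ (lines : List String), Dom_first_paragraph_after_heading_py lines → Spec_first_paragraph_after_heading_py lines (first_paragraph_after_heading_py lines)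

-- ===== LEMMAS AND PROOFS =====

-- ===== VERDICT (by name: the statement is the Claim_ definition above) =====
-- phase 2 agreement: once past the trigger, A's loop is B's collection loop
theorem loopA_true_eq_collect (rest : List String) : ∀ para, fpahLoopA true para rest = fpahCollect para rest := by
  induction rest with
  | nil => intro para; rfl
  | cons line rest ih =>
    intro para
    simp only [fpahLoopA, fpahCollect]
    by_cases hh : PySem.Chars.startswith line.toList ['#'] = true
    · simp [hh, ih]
    · by_cases hb : line = ""
      · simp [hb, ih]
      · simp [hh, hb, ih]

-- phase 1 agreement
theorem loopA_false_eq (lines : List String) :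
    fpahLoopA false [] lines =
      (match fpahStart lines with
       | none => []
       | some rest => fpahCollect [] rest) := by
  induction lines with
  | nil => rfl
  | cons line rest ih =>
    simp only [fpahLoopA, fpahStart]
    by_cases hh : PySem.Chars.startswith line.toList ['#'] = true
    · simp [hh, loopA_true_eq_collect]
    · by_cases ht : looksLikeText line = true
      · simp [hh, ht, loopA_true_eq_collect]
      · simp [hh, ht, ih]

theorem first_paragraph_after_heading_py_spec : Claim_equal_first_paragraph_after_heading_py := by
  intro lines _
  unfold Spec_first_paragraph_after_heading_py first_paragraph_after_heading_py first_paragraph_after_heading_py_alt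
  exact loopA_false_eq lines
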